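-- pv_equiv track=rewrite | github.com/mikewoudenberg/AOC-2019 | assignment16.py | doPhase
-- ===== SOURCE A (Python) =====
-- conv = [0, 1, 0, -1]
--
-- def doPhase(digits):
--     result = []
--     for i in range(len(digits)):
--         row = 0
--         for j, digit in enumerate(digits):
--             repeat = (i+1)
--             convIndex = ((j + 1) // repeat) % 4
--             row += conv[convIndex] * digit
--         result.append(abs(row) % 10)
--
--     return result
-- ===== SOURCE B (Python) =====
-- def doPhase(digits):
--     n = len(digits)
--     # prefix sums: pre[t] = sum of digits[:t]
--     pre = [0]
--     t = 0
--     for d in digits: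
--         t += d
--         pre.append(t)
--     out = []
--     for i in range(n):
--         r = i + 1
--         row = 0
--         sign = 1
--         # the pattern for output i is +1 on blocks [r-1, 2r-1), -1 on [3r-1, 4r-1), ...
--         for s in range(r - 1, n, 2 * r):
--             e = s + r
--             if e > n:
--                 e = n
--             row += sign * (pre[e] - pre[s])
--             sign = -sign
--         out.append(abs(row) % 10)
--     return out
-- ===== Notes on version B (the rewrite author's own statement) =====
-- stated objective: faster
-- what changed: Replaces the per-element coefficient table lookup (n^2 multiply-adds) by a prefix-sum array queried once per nonzero +/- block of the 0,1,0,-1 pattern, so output i costs O(n/i) instead of O(n).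
import Mathlib
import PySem

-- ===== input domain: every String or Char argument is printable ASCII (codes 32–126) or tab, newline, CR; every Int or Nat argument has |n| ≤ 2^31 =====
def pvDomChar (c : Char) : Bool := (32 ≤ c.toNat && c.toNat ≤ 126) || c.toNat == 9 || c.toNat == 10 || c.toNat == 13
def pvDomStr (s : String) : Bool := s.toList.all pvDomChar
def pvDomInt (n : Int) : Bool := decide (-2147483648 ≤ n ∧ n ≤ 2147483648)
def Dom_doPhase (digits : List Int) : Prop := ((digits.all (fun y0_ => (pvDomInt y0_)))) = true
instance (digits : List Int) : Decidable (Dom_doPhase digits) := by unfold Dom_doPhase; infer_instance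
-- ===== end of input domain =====

-- B replaces A's per-element coefficient lookup by a prefix-sum array queried once per
-- nonzero block of the 0,1,0,-1 pattern (objective: faster, O(n log n) vs O(n^2)).

-- ===== PORT A =====
def conv : List Int := [0, 1, 0, -1]

-- conv[convIndex] is ported as (pyGet? conv convIndex).getD 0; exact here because
-- convIndex = (… % 4) with a positive modulus is always in [0, 4).
def doPhase (digits : List Int) : List Int :=
  (PySem.List.pyRange 0 (digits.length : Int) 1).foldl (fun result i =>
    let row := (PySem.List.enumerate digits).foldl (fun row jd =>
      let rep : Int := i + 1
      let convIndex := PySem.Int.mod (PySem.Int.floordiv (jd.1 + 1) rep) 4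
      row + (PySem.List.pyGet? conv convIndex).getD 0 * jd.2) 0
    result ++ [PySem.Int.mod |row| 10]) []

-- ===== PORT B =====
-- pre[e]/pre[s] are ported as (pyGet? pre _).getD 0; exact here because both indices
-- are always in [0, len(pre)).
def doPhase_alt (digits : List Int) : List Int :=
  let n : Int := digits.length
  let pt := digits.foldl (fun (pt : List Int × Int) d => (pt.1 ++ [pt.2 + d], pt.2 + d)) ([0], 0)
  let pre := pt.1
  (PySem.List.pyRange 0 n 1).foldl (fun out i =>
    let r := i + 1
    let rs := (PySem.List.pyRange (r - 1) n (2 * r)).foldl (fun (rs : Int × Int) s =>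
      let e := if s + r > n then n else s + r
      (rs.1 + rs.2 * ((PySem.List.pyGet? pre e).getD 0 - (PySem.List.pyGet? pre s).getD 0), -rs.2))
      (0, 1)
    out ++ [PySem.Int.mod |rs.1| 10]) []

-- ===== PRECONDITION & SPEC =====
def Spec_doPhase (digits : List Int) (out : List Int) : Prop := out = doPhase_alt digits
instance (digits : List Int) (out : List Int) : Decidable (Spec_doPhase digits out) := by unfold Spec_doPhase; infer_instance

-- ===== CLAIM (what is proved, stated in full; the proofs are below) =====
def Claim_equal_doPhase : Prop := ∀ (digits : List Int), Dom_doPhase digits → Spec_doPhase digits (doPhase digits)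

-- ===== LEMMAS AND PROOFS =====

-- the pattern coefficient of output i (r = i+1) at input position j, and the common spec
def pvCoef (r j : Nat) : Int :=
  if ((j + 1) / r) % 4 = 1 then 1 else if ((j + 1) / r) % 4 = 3 then -1 else 0

def pvS (digits : List Int) (i : Nat) : Int :=
  ∑ j ∈ Finset.range digits.length, pvCoef (i + 1) j * digits.getD j 0

lemma convAt (q : Nat) : (PySem.List.pyGet? conv ((q % 4 : Nat) : Int)).getD 0
    = (if q % 4 = 1 then (1:Int) else if q % 4 = 3 then -1 else 0) := by
  have h : q % 4 < 4 := Nat.mod_lt _ (by norm_num)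
  interval_cases h' : q % 4 <;> decide

lemma doPhase_char (digits : List Int) :
    doPhase digits =
      (List.range digits.length).map (fun i => PySem.Int.mod |pvS digits i| 10) := by
  unfold doPhase
  rw [PySem.List.pyRange_zero_natCast, PySem.List.foldl_append_singleton_eq_map, List.map_map]
  apply List.map_congr_left
  intro i hi
  simp only [Function.comp]
  congr 1
  congr 1
  -- row = pvS digits i
  rw [PySem.List.enumerate_eq_map_pyRange digits 0]
  rw [PySem.List.len_eq, PySem.List.pyRange_zero_natCast, List.map_map]
  rw [List.foldl_map, PySem.List.foldl_add]
  simp only [Function.comp, PySem.List.pyGetD_natCast, zero_add]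
  show ((List.range digits.length).map _).sum = pvS digits i
  unfold pvS
  rw [show ∀ f : Nat → Int, ((List.range digits.length).map f).sum
      = ∑ j ∈ Finset.range digits.length, f j from fun f => rfl]
  apply Finset.sum_congr rfl
  intro j hj
  have h1 : ((j:Int) + 1) = ((j+1 : Nat) : Int) := by push_cast; ring
  have h2 : ((i:Int) + 1) = ((i+1 : Nat) : Int) := by push_cast; ring
  rw [h1, h2, PySem.Int.floordiv_natCast, show (4:Int) = ((4:Nat):Int) from rfl,
      PySem.Int.mod_natCast, convAt]
  unfold pvCoef
  rfl

-- 1. the prefix-sum loop builds the list of partial sums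
lemma preFold (xs : List Int) : ∀ (p : List Int) (t : Int),
    xs.foldl (fun pt d => (pt.1 ++ [pt.2 + d], pt.2 + d)) (p, t)
      = (p ++ (List.range xs.length).map (fun k => t + (xs.take (k+1)).sum), t + xs.sum) := by
  induction xs with
  | nil => intro p t; simp
  | cons x xs ih =>
    intro p t
    simp only [List.foldl_cons, ih]
    rw [Prod.mk.injEq]
    constructor
    · simp only [List.length_cons]
      rw [List.append_assoc]
      congr 1
      rw [List.range_succ_eq_map, List.map_cons, List.map_map, List.singleton_append]
      congr 1
      · simp
      · apply List.map_congr_left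
        intro k _
        simp only [Function.comp, List.take_succ_cons, List.sum_cons]
        ring
    · simp [List.sum_cons]; ring

-- 2. sum of a take as a Finset sum
lemma takeSum (xs : List Int) : ∀ (t : Nat), t ≤ xs.length →
    (xs.take t).sum = ∑ j ∈ Finset.range t, xs.getD j 0 := by
  intro t
  induction t with
  | zero => simp
  | succ t ih =>
    intro ht
    have ht' : t < xs.length := by omega
    rw [List.take_add_one, List.sum_append, ih (by omega), Finset.sum_range_succ]
    simp [List.getElem?_eq_getElem ht', List.getD]

-- 3. lookup in the prefix list
lemma preGet (xs : List Int) (t : Nat) (ht : t ≤ xs.length) :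
    ((PySem.List.pyGet? ([0] ++ (List.range xs.length).map (fun k => (xs.take (k+1)).sum)) (t : Int)).getD 0)
      = ∑ j ∈ Finset.range t, xs.getD j 0 := by
  rw [PySem.List.pyGet?_natCast]
  cases t with
  | zero => simp
  | succ t =>
    have ht' : t < xs.length := by omega
    simp only [List.getElem?_append_right (by simp : ([0]:List Int).length ≤ t+1)]
    simp [List.getElem?_map, List.getElem?_eq_getElem (by simpa : t < (List.range xs.length).length),
      takeSum xs (t+1) (by omega)]

-- 4. the alternating-sign block loop
lemma altFold (f : Int → Int) (l : List Int) : ∀ (row σ : Int),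
    (l.foldl (fun (rs : Int × Int) s => (rs.1 + rs.2 * f s, -rs.2)) (row, σ))
      = (row + ∑ m ∈ Finset.range l.length, σ * (-1)^m * f (l.getD m 0), σ * (-1)^l.length) := by
  induction l with
  | nil => intro row σ; simp
  | cons a l ih =>
    intro row σ
    simp only [List.foldl_cons, ih]
    rw [Prod.mk.injEq]
    constructor
    · simp only [List.length_cons]
      rw [Finset.sum_range_succ' (fun m => σ * (-1)^m * f ((a::l).getD m 0))]
      simp only [List.getD_cons_succ, List.getD_cons_zero, pow_zero, pow_succ, mul_one]
      have h : ∀ m, σ * ((-1:Int)^m * -1) * f (l.getD m 0) = -σ * (-1)^m * f (l.getD m 0) := by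
        intro m; ring
      simp only [h]
      ring
    · simp only [List.length_cons, pow_succ]; ring

-- 5. pointwise: the signed block-membership sum collapses to the pattern coefficient
lemma pvKey (n i j M : Nat) (v : Int) (hj : j < n)
    (hM : ∀ m : Nat, m < M ↔ i + 2*(i+1)*m < n) :
    (∑ m ∈ Finset.range M, (-1:Int)^m *
        (if i + 2*(i+1)*m ≤ j ∧ j < i + 2*(i+1)*m + (i+1) then v else 0))
      = pvCoef (i+1) j * v := by
  have hcond : ∀ m : Nat, (i + 2*(i+1)*m ≤ j ∧ j < i + 2*(i+1)*m + (i+1))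
      ↔ (j+1) / (i+1) = 2*m+1 := by
    intro m
    rw [Nat.div_eq_iff (by omega : 0 < i+1)]
    rw [show (2*m+1)*(i+1) = 2*((i+1)*m) + (i+1) from by ring,
        show i + 2*(i+1)*m = 2*((i+1)*m) + i from by ring]
    generalize (i+1)*m = X
    omega
  simp only [hcond]
  rcases Nat.even_or_odd ((j+1) / (i+1)) with he | ho
  · obtain ⟨c, hc⟩ := he
    have hcoef : pvCoef (i+1) j = 0 := by
      unfold pvCoef; split_ifs with h1 h2 <;> omega
    rw [hcoef, zero_mul]
    apply Finset.sum_eq_zero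
    intro m _
    rw [if_neg (by omega), mul_zero]
  · obtain ⟨m0, hm0⟩ := ho
    have hiff : ∀ m : Nat, ((j+1) / (i+1) = 2*m+1) ↔ (m = m0) := by intro m; omega
    simp only [hiff, mul_ite, mul_zero]
    rw [Finset.sum_ite_eq' (Finset.range M) m0 (fun m => (-1:Int)^m * v)]
    have hle : (j+1) / (i+1) * (i+1) ≤ j+1 := Nat.div_mul_le_self _ _
    have hm0M : m0 ∈ Finset.range M := by
      rw [Finset.mem_range, hM]
      rw [hm0, show (2*m0+1)*(i+1) = 2*((i+1)*m0) + (i+1) from by ring] at hle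
      rw [show i + 2*(i+1)*m0 = 2*((i+1)*m0) + i from by ring]
      generalize (i+1)*m0 = X at *
      omega
    rw [if_pos hm0M]
    congr 1
    rcases Nat.even_or_odd m0 with hm | hm
    · rw [hm.neg_one_pow]
      obtain ⟨c, hc⟩ := hm
      unfold pvCoef
      rw [if_pos (by omega)]
    · rw [hm.neg_one_pow]
      obtain ⟨c, hc⟩ := hm
      unfold pvCoef
      rw [if_neg (by omega), if_pos (by omega)]

-- 6. assembly
lemma doPhase_alt_char (digits : List Int) :
    doPhase_alt digits =
      (List.range digits.length).map (fun i => PySem.Int.mod |pvS digits i| 10) := by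
  unfold doPhase_alt
  rw [preFold digits [0] 0]
  simp only []
  rw [PySem.List.pyRange_zero_natCast, PySem.List.foldl_append_singleton_eq_map, List.map_map]
  apply List.map_congr_left
  intro i hi
  have hi' : i < digits.length := List.mem_range.mp hi
  simp only [Function.comp]
  congr 2
  -- inner fold = pvS digits i
  set n' := digits.length with hn'
  have hstep : (0:Int) < 2 * ((i:Int) + 1) := by positivity
  rw [show ((i:Int) + 1 - 1) = (i:Int) from by ring,
      show (2 * ((i:Int)+1)) = 2 * ((i:Int)+1) from rfl]
  rw [PySem.List.pyRange_of_pos (i:Int) (n' : Int) hstep]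
  set K := (if (i:Int) < (n':Int) then (((n':Int) - i + 2*((i:Int)+1) - 1) / (2*((i:Int)+1))).toNat else 0) with hKdef
  have hK : ∀ m : Nat, m < K ↔ i + 2*(i+1)*m < n' := by
    intro m
    rw [hKdef]
    split_ifs with hlt
    · rw [Int.lt_toNat]
      rw [show ((m:Int) < ((n':Int) - i + 2*((i:Int)+1) - 1) / (2*((i:Int)+1)))
            ↔ ((m:Int)+1 ≤ ((n':Int) - i + 2*((i:Int)+1) - 1) / (2*((i:Int)+1))) from by omega]
      rw [Int.le_ediv_iff_mul_le hstep]
      zify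
      rw [show ((m:Int)+1) * (2*((i:Int)+1)) = 2*(((i:Int)+1)*m) + 2*((i:Int)+1) from by ring,
          show (i:Int) + 2*((i:Int)+1)*(m:Int) = 2*(((i:Int)+1)*m) + i from by ring]
      generalize ((i:Int)+1)*(m:Int) = X
      omega
    · constructor
      · omega
      · intro h
        exfalso
        apply hlt
        have : i < n' := by omega
        exact_mod_cast this
  rw [altFold]
  simp only [List.length_map, List.length_range, zero_add, one_mul]
  unfold pvS
  have hterm : ∀ m ∈ Finset.range K,
      ((-1:Int)^m *
        ((PySem.List.pyGet? ([0] ++ (List.range n').map (fun k => (digits.take (k+1)).sum))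
            (if ((List.range K).map (fun k : Nat => (i:Int) + 2*((i:Int)+1)*(k:Int))).getD m 0 + ((i:Int)+1) > (n':Int) then (n':Int)
             else ((List.range K).map (fun k : Nat => (i:Int) + 2*((i:Int)+1)*(k:Int))).getD m 0 + ((i:Int)+1))).getD 0 -
         (PySem.List.pyGet? ([0] ++ (List.range n').map (fun k => (digits.take (k+1)).sum))
            (((List.range K).map (fun k : Nat => (i:Int) + 2*((i:Int)+1)*(k:Int))).getD m 0)).getD 0))
      = (-1:Int)^m * ∑ j ∈ Finset.range n',
          (if i + 2*(i+1)*m ≤ j ∧ j < i + 2*(i+1)*m + (i+1) then digits.getD j 0 else 0) := by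
    intro m hm
    have hmK : m < K := Finset.mem_range.mp hm
    rw [PySem.List.getD_map_range _ _ _ _ hmK]
    have hsn' : i + 2*(i+1)*m < n' := (hK m).mp hmK
    have hsN : ((i:Int) + 2*((i:Int)+1)*(m:Int)) = ((i + 2*(i+1)*m : Nat) : Int) := by
      push_cast; ring
    rw [hsN]
    have he : (if ((i + 2*(i+1)*m : Nat) : Int) + ((i:Int)+1) > (n':Int) then (n':Int)
               else ((i + 2*(i+1)*m : Nat) : Int) + ((i:Int)+1))
        = ((min n' (i + 2*(i+1)*m + (i+1)) : Nat) : Int) := by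
      split_ifs with h <;> push_cast <;> omega
    rw [he, preGet digits _ (Nat.min_le_left _ _), preGet digits _ (le_of_lt hsn')]
    congr 1
    rw [← Finset.sum_Ico_eq_sub (fun j => digits.getD j 0)
          (le_min (le_of_lt hsn') (by omega))]
    have hset : Finset.Ico (i + 2*(i+1)*m) (min n' (i + 2*(i+1)*m + (i+1)))
        = (Finset.range n').filter (fun j => i + 2*(i+1)*m ≤ j ∧ j < i + 2*(i+1)*m + (i+1)) := by
      ext j
      simp only [Finset.mem_Ico, Finset.mem_filter, Finset.mem_range]
      omega
    rw [hset, Finset.sum_filter]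
  rw [Finset.sum_congr rfl hterm]
  simp only [Finset.mul_sum]
  rw [Finset.sum_comm]
  apply Finset.sum_congr rfl
  intro j hj
  exact pvKey n' i j K (digits.getD j 0) (Finset.mem_range.mp hj) hK

-- ===== VERDICT (by name: the statement is the Claim_ definition above) =====
theorem doPhase_spec : Claim_equal_doPhase := by
  intro digits _
  unfold Spec_doPhase
  rw [doPhase_char, doPhase_alt_char]
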